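-- pv_equiv track=rewrite | github.com/pro-vi/mdtools | bench/pi_audit_adapter.py | _has_query_after_mutation
-- ===== SOURCE A (Python) =====
-- from typing import Any, Iterable
--
-- def _has_query_after_mutation(sequence: Iterable[str]) -> bool:
--     saw_mutation = False
--     for kind in sequence:
--         if kind == "mutation":
--             saw_mutation = True
--         elif kind == "query" and saw_mutation:
--             return True
--     return False
-- ===== SOURCE B (Python) =====
-- def _has_query_after_mutation(sequence) -> bool:
--     seq = list(sequence)
--     if "mutation" not in seq or "query" not in seq:
--         return False
--     first_mutation = seq.index("mutation")
--     last_query = len(seq) - 1 - seq[::-1].index("query")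
--     return last_query > first_mutation
-- ===== Notes on version B (the rewrite author's own statement) =====
-- stated objective: alternative
-- what changed: Instead of a flag-carrying scan, B materialises the list and decides by index arithmetic: it compares the position of the first 'mutation' (seq.index) with the position of the last 'query' (found via the reversed list) and returns whether the latter comes strictly later.
import Mathlib
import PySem

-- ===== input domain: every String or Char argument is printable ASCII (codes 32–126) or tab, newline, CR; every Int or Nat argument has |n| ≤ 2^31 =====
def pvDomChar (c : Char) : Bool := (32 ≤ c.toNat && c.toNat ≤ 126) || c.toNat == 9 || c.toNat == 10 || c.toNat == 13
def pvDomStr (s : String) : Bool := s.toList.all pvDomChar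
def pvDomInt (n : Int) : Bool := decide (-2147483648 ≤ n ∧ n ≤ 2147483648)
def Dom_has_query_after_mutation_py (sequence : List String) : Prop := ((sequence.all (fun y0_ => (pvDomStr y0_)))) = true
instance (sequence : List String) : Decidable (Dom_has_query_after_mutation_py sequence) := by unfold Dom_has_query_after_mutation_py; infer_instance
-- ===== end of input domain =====

-- B decides by index arithmetic (first "mutation" index vs last "query" index via the reversed list) instead of A's flag-carrying scan; objective: alternative.


-- ===== PORT A =====
-- Port of A: single loop carrying the saw_mutation flag.
def hqamA_loop : List String → Bool → Bool
  | [], _ => false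
  | kind :: rest, saw =>
    if kind == "mutation" then hqamA_loop rest true
    else if kind == "query" && saw then true
    else hqamA_loop rest saw

def has_query_after_mutation_py (sequence : List String) : Bool :=
  hqamA_loop sequence false

-- ===== PORT B =====
-- Port of B: guard on membership, then compare seq.index("mutation") with
-- len(seq) - 1 - seq[::-1].index("query").  seq[::-1] is PySem.List.slice? … (-1);
-- both index? calls return some because membership was checked first.
def has_query_after_mutation_py_alt (sequence : List String) : Bool :=
  if !(sequence.contains "mutation") || !(sequence.contains "query") then
    false
  else
    match PySem.List.index? sequence "mutation",
          (PySem.List.slice? sequence none none (-1)).bind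
            (fun r => PySem.List.index? r "query") with
    | some first_mutation, some rq =>
        decide (sequence.length - 1 - rq > first_mutation)
    | _, _ => false

-- ===== PRECONDITION & SPEC =====
def Spec_has_query_after_mutation_py (sequence : List String) (out : Bool) : Prop := out = has_query_after_mutation_py_alt sequence
instance (sequence : List String) (out : Bool) : Decidable (Spec_has_query_after_mutation_py sequence out) := by unfold Spec_has_query_after_mutation_py; infer_instance

-- ===== CLAIM (what is proved, stated in full; the proofs are below) =====
def Claim_equal_has_query_after_mutation_py : Prop := ∀ (sequence : List String), Dom_has_query_after_mutation_py sequence → Spec_has_query_after_mutation_py sequence (has_query_after_mutation_py sequence)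

-- ===== LEMMAS AND PROOFS =====

-- proof-side intermediate: first "mutation", then search the remainder for "query"
def hqamPhase1 : List String → Bool
  | [] => false
  | kind :: rest =>
    if kind == "mutation" then rest.any (fun k => k == "query")
    else hqamPhase1 rest

-- once the flag is set, A's loop just searches for "query"
theorem hqamA_loop_true (l : List String) : hqamA_loop l true = l.any (fun k => k == "query") := by
  induction l with
  | nil => rfl
  | cons k rest ih =>
    simp only [hqamA_loop, List.any_cons]
    by_cases hm : k = "mutation"
    · simp [hm, ih]
    · by_cases hq : k = "query" <;> simp [hm, hq, ih]

theorem hqamA_loop_false (l : List String) : hqamA_loop l false = hqamPhase1 l := by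
  induction l with
  | nil => rfl
  | cons k rest ih =>
    simp only [hqamA_loop, hqamPhase1]
    by_cases hm : k = "mutation"
    · simp [hm, hqamA_loop_true]
    · simp [hm, ih]

theorem hqamPhase1_of_not_mem (l : List String) (h : "mutation" ∉ l) : hqamPhase1 l = false := by
  induction l with
  | nil => rfl
  | cons k rest ih =>
    simp only [List.mem_cons, not_or] at h
    simp only [hqamPhase1]
    have : ¬ (k = "mutation") := fun hk => h.1 hk.symm
    simp [this, ih h.2]

theorem hqamPhase1_of_index? (l : List String) (fm : ℕ)
    (h : PySem.List.index? l "mutation" = some fm) :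
    hqamPhase1 l = (l.drop (fm + 1)).any (fun k => k == "query") := by
  induction l generalizing fm with
  | nil => simp [PySem.List.index?] at h
  | cons k rest ih =>
    by_cases hm : k = "mutation"
    · subst hm
      rw [PySem.List.index?_cons_self] at h
      cases h
      simp [hqamPhase1]
    · rw [PySem.List.index?_cons_of_ne rest (fun he => hm he)] at h
      cases hfm' : PySem.List.index? rest "mutation" with
      | none => rw [hfm'] at h; simp at h
      | some fm' =>
        rw [hfm'] at h
        simp only [Option.map_some] at h
        cases h
        simp only [hqamPhase1]
        rw [ih fm' hfm']
        simp only [List.drop_succ_cons]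
        split_ifs with hk
        · exact absurd (beq_iff_eq.mp hk) hm
        · rfl

theorem has_query_after_mutation_py_spec : Claim_equal_has_query_after_mutation_py := by
  intro l _
  unfold Spec_has_query_after_mutation_py has_query_after_mutation_py has_query_after_mutation_py_alt
  rw [hqamA_loop_false]
  by_cases hmut : "mutation" ∈ l
  · by_cases hq : "query" ∈ l
    · -- both guards pass
      have hcont : (!(l.contains "mutation") || !(l.contains "query")) = false := by
        simp [hmut, hq]
      rw [hcont]
      simp only [Bool.false_eq_true, if_false]
      obtain ⟨fm, hfm⟩ := Option.isSome_iff_exists.mp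
        ((PySem.List.index?_isSome_iff (xs := l) (v := "mutation")).mpr hmut)
      obtain ⟨rq, hrq⟩ := Option.isSome_iff_exists.mp
        ((PySem.List.index?_isSome_iff (xs := l.reverse) (v := "query")).mpr
          (List.mem_reverse.mpr hq))
      rw [PySem.List.slice?_none_none_neg_one]
      simp only [Option.bind_some, hfm, hrq]
      -- facts about fm (first mutation) and rq (query position in reverse)
      obtain ⟨hfmlt, hfmval, _⟩ := PySem.List.getElem_of_index?_eq_some hfm
      obtain ⟨hrqlt, hrqval, hrqmin⟩ := PySem.List.getElem_of_index?_eq_some hrq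
      rw [List.length_reverse] at hrqlt
      -- lq := l.length - 1 - rq is the LAST index of "query" in l
      set lq := l.length - 1 - rq with hlqdef
      have hlq_lt : lq < l.length := by omega
      have hlq_val : l[lq]'hlq_lt = "query" := by
        have := hrqval
        rw [List.getElem_reverse] at this
        have he : l.length - 1 - rq = lq := rfl
        simpa [he] using this
      have hlq_max : ∀ j (hj : j < l.length), lq < j → l[j]'hj ≠ "query" := by
        intro j hj hgt
        have hjr : l.length - 1 - j < rq := by omega
        have := hrqmin (l.length - 1 - j) (by omega)
        rw [List.getElem_reverse] at this
        have he : l.length - 1 - (l.length - 1 - j) = j := by omega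
        simpa [he] using this
      -- compare
      rw [hqamPhase1_of_index? l fm hfm]
      by_cases hcmp : fm < lq
      · have hmem : "query" ∈ l.drop (fm + 1) := by
          rw [List.mem_iff_getElem]
          refine ⟨lq - (fm + 1), by simp [List.length_drop]; omega, ?_⟩
          rw [List.getElem_drop]
          have he : fm + 1 + (lq - (fm + 1)) = lq := by omega
          simp_rw [he]
          exact hlq_val
        have hany : (l.drop (fm + 1)).any (fun k => k == "query") = true := by
          simp only [List.any_eq_true]
          exact ⟨_, hmem, by simp⟩
        rw [hany]
        exact (decide_eq_true hcmp).symm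
      · have h2 : (l.drop (fm + 1)).any (fun k => k == "query") = false := by
          simp only [List.any_eq_false]
          intro x hx
          rw [List.mem_iff_getElem] at hx
          obtain ⟨i, hi, hxi⟩ := hx
          rw [List.getElem_drop] at hxi
          have hilen : fm + 1 + i < l.length := by
            simp [List.length_drop] at hi; omega
          have := hlq_max (fm + 1 + i) hilen (by omega)
          rw [hxi] at this
          simp [this]
        rw [h2]
        exact (decide_eq_false hcmp).symm
    · -- no "query" anywhere
      have hcont : (!(l.contains "mutation") || !(l.contains "query")) = true := by
        simp [hq]
      rw [hcont]
      simp only [if_true]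
      obtain ⟨fm, hfm⟩ := Option.isSome_iff_exists.mp
        ((PySem.List.index?_isSome_iff (xs := l) (v := "mutation")).mpr hmut)
      rw [hqamPhase1_of_index? l fm hfm]
      simp only [List.any_eq_false]
      intro x hx
      have hxl : x ∈ l := List.mem_of_mem_drop hx
      have hne : x ≠ "query" := fun hxe => hq (hxe ▸ hxl)
      simp [hne]
  · -- no "mutation" anywhere
    have hcont : (!(l.contains "mutation") || !(l.contains "query")) = true := by
      simp [hmut]
    rw [hcont, hqamPhase1_of_not_mem l hmut]
    simp
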